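-- pv_equiv track=rewrite | github.com/KohakuBlueleaf/KohakuNodeIR | app/frontend/public/pylib/kohakunode/layout/score.py | _count_overlaps
-- ===== SOURCE A (Python) =====
-- from collections import defaultdict
--
-- def _count_overlaps(grid: dict[str, tuple[int, int]]) -> int:
--     """Count pairs of nodes occupying the same grid cell."""
--     cell_counts: dict[tuple[int, int], int] = defaultdict(int)
--     for pos in grid.values():
--         cell_counts[pos] += 1
--
--     overlaps = 0
--     for count in cell_counts.values():
--         if count > 1:
--             # C(count, 2) = number of overlapping pairs
--             overlaps += count * (count - 1) // 2
--
--     return overlaps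
-- ===== SOURCE B (Python) =====
-- def _count_overlaps(grid: dict[str, tuple[int, int]]) -> int:
--     """Count pairs of nodes occupying the same grid cell."""
--     seen: dict[tuple[int, int], int] = {}
--     overlaps = 0
--     for pos in grid.values():
--         prior = seen.get(pos, 0)
--         overlaps += prior
--         seen[pos] = prior + 1
--     return overlaps
-- ===== Notes on version B (the rewrite author's own statement) =====
-- stated objective: simpler
-- what changed: Replaced A's two passes (build a full per-cell counter, then sum count*(count-1)//2 over its values) with a single online pass that, for each position, adds the number of nodes already seen in that cell to a running total.
import Mathlib
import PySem

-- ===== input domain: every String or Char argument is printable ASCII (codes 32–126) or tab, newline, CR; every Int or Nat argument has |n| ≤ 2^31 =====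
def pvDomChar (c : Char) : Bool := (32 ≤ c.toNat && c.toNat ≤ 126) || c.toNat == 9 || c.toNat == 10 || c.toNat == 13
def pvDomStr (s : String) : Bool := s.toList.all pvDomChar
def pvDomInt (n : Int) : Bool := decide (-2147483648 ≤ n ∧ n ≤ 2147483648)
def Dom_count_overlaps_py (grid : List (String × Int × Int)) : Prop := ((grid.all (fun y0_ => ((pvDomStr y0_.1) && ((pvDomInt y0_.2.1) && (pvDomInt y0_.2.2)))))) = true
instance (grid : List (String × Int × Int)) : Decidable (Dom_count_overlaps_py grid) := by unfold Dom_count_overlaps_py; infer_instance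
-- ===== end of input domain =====

-- B replaces A's two passes (build a full cell counter, then sum C(count,2) per cell) by one
-- online pass that adds, for each node, the number of nodes already seen in its cell (objective: simpler).

-- ===== PORT A =====
def count_overlaps_py (grid : List (String × Int × Int)) : Int :=
  let cellCounts : PySem.Dict (Int × Int) Int :=
    (PySem.Dict.ofList grid).values.foldl (fun d pos => d.modify pos 0 (· + 1)) PySem.Dict.empty
  cellCounts.values.foldl
    (fun overlaps count =>
      if count > 1 then overlaps + PySem.Int.floordiv (count * (count - 1)) 2 else overlaps) 0

-- ===== PORT B =====
def count_overlaps_py_alt (grid : List (String × Int × Int)) : Int :=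
  ((PySem.Dict.ofList grid).values.foldl
    (fun (st : PySem.Dict (Int × Int) Int × Int) pos =>
      let prior := st.1.getD pos 0
      (st.1.insert pos (prior + 1), st.2 + prior))
    (PySem.Dict.empty, 0)).2

-- ===== PRECONDITION & SPEC =====
def Spec_count_overlaps_py (grid : List (String × Int × Int)) (out : Int) : Prop := out = count_overlaps_py_alt grid
instance (grid : List (String × Int × Int)) (out : Int) : Decidable (Spec_count_overlaps_py grid out) := by unfold Spec_count_overlaps_py; infer_instance

-- ===== CLAIM (what is proved, stated in full; the proofs are below) =====
def Claim_equal_count_overlaps_py : Prop := ∀ (grid : List (String × Int × Int)), Dom_count_overlaps_py grid → Spec_count_overlaps_py grid (count_overlaps_py grid)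

-- ===== LEMMAS AND PROOFS =====

-- pairs contributed by a cell with count c (A's loop body summand)
def pvTri (c : Int) : Int := if c > 1 then PySem.Int.floordiv (c * (c - 1)) 2 else 0

-- A's second loop is the sum of pvTri over the counter's values
lemma pvFoldl_tri (l : List Int) (a : Int) :
    l.foldl (fun overlaps count =>
      if count > 1 then overlaps + PySem.Int.floordiv (count * (count - 1)) 2 else overlaps) a
      = a + (l.map pvTri).sum := by
  induction l generalizing a with
  | nil => simp
  | cons c t ih =>
    simp only [List.foldl_cons, List.map_cons, List.sum_cons, ih, pvTri]
    split_ifs <;> ring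

lemma pvTri_succ (c : Int) (hc : 0 ≤ c) : pvTri (c + 1) = pvTri c + c := by
  unfold pvTri
  rcases lt_or_ge c 2 with h | h
  · interval_cases c <;> simp [PySem.Int.floordiv]
  · have h1 : (1 : Int) < c + 1 := by omega
    have h2 : (1 : Int) < c := by omega
    rw [if_pos h1, if_pos h2,
      PySem.Int.floordiv_eq_ediv_of_pos (by norm_num : (0:Int) < 2),
      PySem.Int.floordiv_eq_ediv_of_pos (by norm_num : (0:Int) < 2)]
    have : (c + 1) * (c + 1 - 1) = c * (c - 1) + c * 2 := by ring
    rw [this, Int.add_mul_ediv_right _ _ (by norm_num)]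

-- A's value on a list of positions, as a sum over the distinct cells
def pvTallyA (vs : List (Int × Int)) : Int :=
  ((PySem.Set.ofList vs).map (fun k => pvTri ((vs.count k : Nat) : Int))).sum

lemma pvA_eq_tally (vs : List (Int × Int)) :
    (vs.foldl (fun d pos => d.modify pos 0 (· + 1)) PySem.Dict.empty).values.foldl
      (fun overlaps count =>
        if count > 1 then overlaps + PySem.Int.floordiv (count * (count - 1)) 2 else overlaps) 0
      = pvTallyA vs := by
  rw [← PySem.Dict.counter_eq_foldl, pvFoldl_tri]
  simp only [PySem.Dict.values, PySem.Dict.items_counter, List.map_map, pvTallyA, zero_add]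
  rfl

-- B's fold keeps the counter of the processed prefix in its first component
lemma pvB_fst (vs : List (Int × Int)) (d : PySem.Dict (Int × Int) Int) (a : Int) :
    (vs.foldl (fun (st : PySem.Dict (Int × Int) Int × Int) pos =>
        let prior := st.1.getD pos 0
        (st.1.insert pos (prior + 1), st.2 + prior)) (d, a)).1
      = vs.foldl (fun d x => d.insert x (d.getD x 0 + 1)) d := by
  induction vs generalizing d a with
  | nil => rfl
  | cons v t ih => simp only [List.foldl_cons]; exact ih _ _

lemma pvB_snd_append (vs : List (Int × Int)) (x : Int × Int) :
    (( (vs ++ [x]).foldl (fun (st : PySem.Dict (Int × Int) Int × Int) pos =>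
        let prior := st.1.getD pos 0
        (st.1.insert pos (prior + 1), st.2 + prior)) (PySem.Dict.empty, 0)).2)
      = ((vs.foldl (fun (st : PySem.Dict (Int × Int) Int × Int) pos =>
        let prior := st.1.getD pos 0
        (st.1.insert pos (prior + 1), st.2 + prior)) (PySem.Dict.empty, 0)).2)
        + ((vs.count x : Nat) : Int) := by
  rw [List.foldl_append]
  simp only [List.foldl_cons, List.foldl_nil]
  congr 1
  rw [pvB_fst, PySem.Dict.foldl_insert_getD_add_one_eq_counter, PySem.Dict.getD_counter]

-- the summed tallies change by exactly vs.count x when x is appended and already occurs in the index list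
lemma pvSum_count_append {s vs : List (Int × Int)} {x : Int × Int}
    (hnd : s.Nodup) (hmem : x ∈ s) :
    (s.map (fun k => pvTri (((vs ++ [x]).count k : Nat) : Int))).sum
      = (s.map (fun k => pvTri ((vs.count k : Nat) : Int))).sum + ((vs.count x : Nat) : Int) := by
  have hperm := List.perm_cons_erase hmem
  rw [(hperm.map _).sum_eq, (hperm.map _).sum_eq]
  simp only [List.map_cons, List.sum_cons]
  have hrest : (s.erase x).map (fun k => pvTri (((vs ++ [x]).count k : Nat) : Int))
      = (s.erase x).map (fun k => pvTri ((vs.count k : Nat) : Int)) := by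
    refine List.map_congr_left (fun k hk => ?_)
    have hkx : k ≠ x := ((List.Nodup.mem_erase_iff hnd).mp hk).1
    simp [List.count_append, Ne.symm hkx]
  rw [hrest]
  have hc : (((vs ++ [x]).count x : Nat) : Int) = ((vs.count x : Nat) : Int) + 1 := by
    simp [List.count_append]
  rw [hc, pvTri_succ _ (by positivity)]
  ring

lemma pvTallyA_append (vs : List (Int × Int)) (x : Int × Int) :
    pvTallyA (vs ++ [x]) = pvTallyA vs + ((vs.count x : Nat) : Int) := by
  unfold pvTallyA
  rw [PySem.Set.ofList_append_singleton]
  by_cases hx : x ∈ vs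
  · have hmem : x ∈ PySem.Set.ofList vs := (PySem.Set.mem_ofList vs x).mpr hx
    have hset : (PySem.Set.ofList vs).add x = PySem.Set.ofList vs := by
      simp [PySem.Set.add, hmem]
    rw [hset]
    exact pvSum_count_append (PySem.Set.nodup_ofList vs) hmem
  · have hmem : x ∉ PySem.Set.ofList vs := fun h => hx ((PySem.Set.mem_ofList vs x).mp h)
    have hset : (PySem.Set.ofList vs).add x = PySem.Set.ofList vs ++ [x] := by
      simp [PySem.Set.add, hmem]
    rw [hset, List.map_append, List.sum_append]
    have hcongr : (PySem.Set.ofList vs).map (fun k => pvTri (((vs ++ [x]).count k : Nat) : Int))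
        = (PySem.Set.ofList vs).map (fun k => pvTri ((vs.count k : Nat) : Int)) := by
      refine List.map_congr_left (fun k hk => ?_)
      have hkx : k ≠ x := fun h => hmem (h ▸ hk)
      simp [List.count_append, Ne.symm hkx]
    have hx0 : vs.count x = 0 := List.count_eq_zero.mpr hx
    rw [hcongr]
    simp [hx0, pvTri]

-- main: A's tally equals B's online accumulation
lemma pvMain (vs : List (Int × Int)) :
    pvTallyA vs
      = (vs.foldl (fun (st : PySem.Dict (Int × Int) Int × Int) pos =>
          let prior := st.1.getD pos 0
          (st.1.insert pos (prior + 1), st.2 + prior)) (PySem.Dict.empty, 0)).2 := by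
  induction vs using List.reverseRecOn with
  | nil => rfl
  | append_singleton t x ih => rw [pvTallyA_append, pvB_snd_append, ih]

-- ===== VERDICT (by name: the statement is the Claim_ definition above) =====
theorem count_overlaps_py_spec : Claim_equal_count_overlaps_py := by
  intro grid _
  unfold Spec_count_overlaps_py count_overlaps_py count_overlaps_py_alt
  rw [pvA_eq_tally, pvMain]
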